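-- pv_equiv track=rewrite | github.com/PaulinhoRDC/LaboratoriosDeAlgoritmia-II | Torneios/Torneio1.py | deliveryPoints
-- ===== SOURCE A (Python) =====
-- def deliveryPoints (buildingsList,adjList):
--     ret = {}
--     for i in range(0,len(buildingsList)):
--         t=len(buildingsList[i])
--         if t not in ret:
--             ret[t]=[]
--         ret[t].append(adjList[i])
--     return ret
-- ===== SOURCE B (Python) =====
-- def deliveryPoints(buildingsList, adjList):
--     # Group adjacency entries by building size: compute the size sequence once,
--     # then build each group with a per-key scan, keys in first-occurrence order.
--     lengths = [len(b) for b in buildingsList]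
--     return {t: [adjList[i] for i, l in enumerate(lengths) if l == t]
--             for t in dict.fromkeys(lengths)}
-- ===== Notes on version B (the rewrite author's own statement) =====
-- stated objective: alternative
-- what changed: Replaces A's single-pass dict-append loop by a two-phase grouping: the length sequence is computed once, the distinct keys are taken in first-occurrence order, and each group is built by its own filtered scan of the enumerated lengths.
import Mathlib
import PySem

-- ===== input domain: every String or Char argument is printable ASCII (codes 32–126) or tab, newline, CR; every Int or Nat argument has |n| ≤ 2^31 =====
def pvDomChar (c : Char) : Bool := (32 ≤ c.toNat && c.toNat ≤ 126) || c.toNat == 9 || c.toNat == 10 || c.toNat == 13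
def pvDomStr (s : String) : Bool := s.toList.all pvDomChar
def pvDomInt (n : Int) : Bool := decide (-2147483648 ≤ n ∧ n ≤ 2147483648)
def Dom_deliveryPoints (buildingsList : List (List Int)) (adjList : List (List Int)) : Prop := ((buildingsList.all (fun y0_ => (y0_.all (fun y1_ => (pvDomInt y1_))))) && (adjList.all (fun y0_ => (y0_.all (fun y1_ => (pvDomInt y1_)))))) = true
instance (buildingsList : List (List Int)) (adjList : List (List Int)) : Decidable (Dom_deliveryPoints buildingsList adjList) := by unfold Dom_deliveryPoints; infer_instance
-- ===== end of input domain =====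

-- B groups by a per-key filtered scan of the precomputed length sequence instead of A's
-- single-pass dict-append loop; objective: alternative decomposition (not faster).

-- ===== PORT A =====
def deliveryPoints (buildingsList : List (List Int)) (adjList : List (List Int)) : List (Int × List (List Int)) :=
  -- ret = {}; for i in range(0, len(buildingsList)): t = len(buildingsList[i]);
  --   if t not in ret: ret[t] = []   (= setdefault t []);  ret[t].append(adjList[i])
  let ret : PySem.Dict Int (List (List Int)) :=
    (PySem.List.pyRange 0 (buildingsList.length : Int) 1).foldl (fun ret i =>
      let t : Int := (PySem.List.pyGetD buildingsList i []).length
      let ret := ret.setdefault t []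
      ret.modify t [] (fun l => l ++ [PySem.List.pyGetD adjList i []])) PySem.Dict.empty
  ret.items

-- ===== PORT B =====
def deliveryPoints_alt (buildingsList : List (List Int)) (adjList : List (List Int)) : List (Int × List (List Int)) :=
  let lengths : List Int := buildingsList.map (fun b => (b.length : Int))
  -- {t: [adjList[i] for i, l in enumerate(lengths) if l == t] for t in dict.fromkeys(lengths)}
  (PySem.Set.ofList lengths).map (fun t =>
    (t, (PySem.List.enumerate lengths).filterMap (fun p =>
          if p.2 = t then some (PySem.List.pyGetD adjList p.1 []) else none)))

-- ===== PRECONDITION & SPEC =====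
-- A (and B) raise IndexError on adjList[i] when adjList is shorter than buildingsList.
def Pre_deliveryPoints (buildingsList : List (List Int)) (adjList : List (List Int)) : Prop :=
  buildingsList.length ≤ adjList.length
instance (buildingsList : List (List Int)) (adjList : List (List Int)) : Decidable (Pre_deliveryPoints buildingsList adjList) := by unfold Pre_deliveryPoints; infer_instance
def pvWitness_deliveryPoints : List (List Int) × List (List Int) := ([[1], [2, 3]], [[4], [5]])

def Spec_deliveryPoints (buildingsList : List (List Int)) (adjList : List (List Int)) (out : List (Int × List (List Int))) : Prop := out = deliveryPoints_alt buildingsList adjList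
instance (buildingsList : List (List Int)) (adjList : List (List Int)) (out : List (Int × List (List Int))) : Decidable (Spec_deliveryPoints buildingsList adjList out) := by unfold Spec_deliveryPoints; infer_instance

-- ===== CLAIM (what is proved, stated in full; the proofs are below) =====
def Claim_equal_deliveryPoints : Prop := ∀ (buildingsList : List (List Int)) (adjList : List (List Int)), Dom_deliveryPoints buildingsList adjList → Pre_deliveryPoints buildingsList adjList → Spec_deliveryPoints buildingsList adjList (deliveryPoints buildingsList adjList)

-- ===== LEMMAS AND PROOFS =====

theorem setdefault_modify_eq_modify (d : PySem.Dict Int (List (List Int))) (t : Int)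
    (f : List (List Int) → List (List Int)) :
    (d.setdefault t []).modify t [] f = d.modify t [] f := by
  by_cases h : d.contains t = true
  · simp [PySem.Dict.setdefault, h]
  · rw [PySem.Dict.setdefault_of_not_contains _ _ (by simpa using h)]
    simp only [PySem.Dict.modify, PySem.Dict.getD_insert_self, PySem.Dict.insert_insert_self,
      PySem.Dict.getD_of_not_contains _ _ (by simpa using h)]

theorem filter_map_eq_filterMap {α β γ : Type} [DecidableEq γ] (l : List α) (g : α → γ × β) (t : γ) :
    ((l.map g).filter (fun p => p.1 == t)).map (fun p => p.2)
      = l.filterMap (fun a => if (g a).1 = t then some (g a).2 else none) := by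
  induction l with
  | nil => simp
  | cons a l ih =>
    simp only [List.map_cons, List.filter_cons, List.filterMap_cons]
    by_cases h : (g a).1 = t <;> simp [h, ih]

theorem ports_agree (bl al : List (List Int)) :
    deliveryPoints bl al = deliveryPoints_alt bl al := by
  unfold deliveryPoints deliveryPoints_alt
  simp only [setdefault_modify_eq_modify]
  rw [show (List.foldl (fun ret i => ret.modify ((PySem.List.pyGetD bl i []).length : Int) [] fun l => l ++ [PySem.List.pyGetD al i []])
        PySem.Dict.empty (PySem.List.pyRange 0 (bl.length : Int) 1))
      = (List.foldl (fun (d : PySem.Dict Int (List (List Int))) p => d.modify p.1 [] fun l => l ++ [p.2])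
        PySem.Dict.empty ((PySem.List.pyRange 0 (bl.length : Int) 1).map
          (fun i => (((PySem.List.pyGetD bl i []).length : Int), PySem.List.pyGetD al i []))))
      from (@List.foldl_map _ _ _
        (fun i => (((PySem.List.pyGetD bl i []).length : Int), PySem.List.pyGetD al i []))
        (fun (d : PySem.Dict Int (List (List Int))) p => d.modify p.1 [] fun l => l ++ [p.2]) _ _).symm]
  rw [PySem.Dict.items_eq_map_keys _
        (PySem.Dict.nodup_keys_foldl_modify_key _ (fun (p : Int × List Int) => p.1) []
          (fun (_ : PySem.Dict Int (List (List Int))) p => fun l => l ++ [p.2]) _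
          (by simp [PySem.Dict.keys_empty])) []]
  rw [PySem.Dict.keys_foldl_modify_key _ (fun (p : Int × List Int) => p.1) []
        (fun (_ : PySem.Dict Int (List (List Int))) p => fun l => l ++ [p.2])]
  rw [PySem.Dict.keys_empty, PySem.Set.update_nil_left]
  rw [show (List.map (fun (p : Int × List Int) => p.1)
        (List.map (fun i => (((PySem.List.pyGetD bl i []).length : Int), PySem.List.pyGetD al i []))
          (PySem.List.pyRange 0 (bl.length : Int) 1)))
      = List.map (fun b => ((b.length : Int))) bl from ?keysEq]
  case keysEq =>
    rw [List.map_map]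
    have := PySem.List.map_pyGetD_pyRange_zero bl []
    calc List.map ((fun (p : Int × List Int) => p.1) ∘
            (fun i => (((PySem.List.pyGetD bl i []).length : Int), PySem.List.pyGetD al i [])))
            (PySem.List.pyRange 0 (bl.length : Int) 1)
        = List.map (fun b => ((b.length : Int)))
            (List.map (fun j => PySem.List.pyGetD bl j []) (PySem.List.pyRange 0 (bl.length : Int) 1)) := by
          rw [List.map_map]; rfl
      _ = List.map (fun b => ((b.length : Int))) bl := by
          rw [show (bl.length : Int) = PySem.List.len bl from rfl, this]
  apply List.map_congr_left
  intro t _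
  beta_reduce
  rw [PySem.Dict.getD_foldl_modify_append, PySem.Dict.getD_empty, List.nil_append]
  rw [filter_map_eq_filterMap]
  rw [PySem.List.enumerate_eq_map_pyRange _ (0 : Int), List.filterMap_map]
  refine congrArg (fun l => (t, l)) ?_
  have hlen : PySem.List.len (List.map (fun (b : List Int) => ((b.length : Int))) bl)
      = (bl.length : Int) := by simp [PySem.List.len]
  rw [hlen]
  apply List.filterMap_congr
  intro i _
  have h0 : (0:Int) = ((([]:List Int).length : Int)) := rfl
  simp only [Function.comp]
  rw [h0, PySem.List.pyGetD_map]

-- ===== VERDICT (by name: the statement is the Claim_ definition above) =====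
theorem deliveryPoints_spec : Claim_equal_deliveryPoints := by
  intro bl al _ _
  unfold Spec_deliveryPoints
  exact ports_agree bl al
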